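-- pv_equiv track=rewrite | github.com/juanpadan/algebra-facile | phrase.py | raggruppa
-- ===== SOURCE A (Python) =====
-- def raggruppa(indice,stringa):
--     """accetta indice di inizio della parentesi e la stringa, raggruppa
--     in una stringa il contenuto della parentesi. Ritorna il la coppia
--     (nuovoinidice,stringa)"""
--
--     indice+=1
--     inizio = indice
--     par = 1
--     out = ""
--     while par>0:
--
--         if stringa[indice]=="(":
--             par +=1
--         elif stringa[indice]==")":
--             par -=1
--         indice+=1
--     return (indice,stringa[inizio:indice-1])
-- ===== SOURCE B (Python) =====
-- def raggruppa(indice, stringa):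
--     """Recursive descent over the nesting structure: salta(i) returns the
--     index just past the ')' closing the group that is open at position i,
--     recursing to skip each nested group whole."""
--     def salta(i):
--         while True:
--             c = stringa[i]
--             i += 1
--             if c == ')':
--                 return i
--             if c == '(':
--                 i = salta(i)
--     inizio = indice + 1
--     fine = salta(inizio)
--     return (fine, stringa[inizio:fine - 1])
-- ===== Notes on version B (the rewrite author's own statement) =====
-- stated objective: alternative
-- what changed: Replaces the single while-loop with a mutable depth counter by recursive descent over the nesting structure: a helper scans one nesting level and recurses to skip each inner parenthesised group whole, so no counter is ever maintained.
import Mathlib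
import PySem

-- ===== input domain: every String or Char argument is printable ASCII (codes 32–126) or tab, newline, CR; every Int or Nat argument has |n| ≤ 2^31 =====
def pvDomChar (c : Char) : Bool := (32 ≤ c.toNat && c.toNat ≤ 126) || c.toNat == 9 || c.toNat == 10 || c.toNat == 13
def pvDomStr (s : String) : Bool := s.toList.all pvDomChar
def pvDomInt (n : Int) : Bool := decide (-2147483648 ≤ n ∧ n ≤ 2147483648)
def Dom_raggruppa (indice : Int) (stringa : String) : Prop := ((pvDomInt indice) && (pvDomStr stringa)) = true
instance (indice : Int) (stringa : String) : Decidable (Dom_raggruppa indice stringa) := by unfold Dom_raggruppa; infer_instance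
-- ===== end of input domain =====

-- B replaces A's counter while-loop by recursive descent over the nesting structure (alternative
-- decomposition, same cost); the equivalence below is about the return value (A mutates nothing).

-- ===== PORT A =====
-- A's while loop: fuel is a totality guard only (2*len+2 always outlives the loop, which either
-- exits or hits an IndexError — pyGet? none — before the fuel runs out); par = 0 is the exit test.
def loopA (s : List Char) : Nat → Int → Nat → Option Int
  | _, i, 0 => some i
  | 0, _, _ + 1 => none
  | fuel + 1, i, par + 1 =>
      match PySem.List.pyGet? s i with
      | none => none
      | some c =>
        if c = '(' then loopA s fuel (i + 1) (par + 2)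
        else if c = ')' then loopA s fuel (i + 1) par
        else loopA s fuel (i + 1) (par + 1)

def raggruppa (indice : Int) (stringa : String) : Int × String :=
  let s := stringa.toList
  let inizio := indice + 1
  match loopA s (2 * s.length + 2) inizio 1 with
  | some fin => (fin, PySem.Str.slice stringa (some inizio) (some (fin - 1)))
  | none => (0, "")   -- unreachable under Pre_: Python raises IndexError here

-- ===== PORT B =====
-- Source B's salta: scans the current nesting level, recursing to skip inner groups; it returns the
-- remaining fuel (one unit per character read, with the bound f' < fuel recorded in the subtype so
-- the continuation call is well-founded).  Fuel is a totality guard only, as in port A.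
def scanB (s : List Char) : (fuel : Nat) → Int → Option {p : Int × Nat // p.2 < fuel}
  | 0, _ => none
  | f + 1, i =>
      match PySem.List.pyGet? s i with
      | none => none
      | some c =>
        if c = ')' then some ⟨(i + 1, f), by omega⟩
        else if c = '(' then
          match scanB s f (i + 1) with
          | none => none
          | some ⟨(j, f'), h⟩ =>
            match scanB s f' j with
            | none => none
            | some ⟨(k, f''), h'⟩ => some ⟨(k, f''), by omega⟩
        else
          match scanB s f (i + 1) with
          | none => none
          | some ⟨(j, f'), h⟩ => some ⟨(j, f'), by omega⟩

def raggruppa_alt (indice : Int) (stringa : String) : Int × String :=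
  let s := stringa.toList
  let inizio := indice + 1
  match scanB s (2 * s.length + 2) inizio with
  | some ⟨(fine, _), _⟩ => (fine, PySem.Str.slice stringa (some inizio) (some (fine - 1)))
  | none => (0, "")   -- unreachable under Pre_: Python raises IndexError here

-- ===== PRECONDITION & SPEC =====
-- The characters Python's scan can touch, starting at position i of s: for a non-negative start the
-- suffix from i; for a negative in-range start, the wrapped-around suffix followed by the whole
-- string (negative indices read from the end and the loop then continues into 0, 1, …); otherwise none.
def scanStream (s : List Char) (i : Int) : List Char :=
  if 0 ≤ i then s.drop i.toNat
  else if -(s.length : Int) ≤ i then s.drop ((s.length : Int) + i).toNat ++ s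
  else []

-- Pre_: the scan finds its matching close, i.e. some prefix of the reachable characters contains
-- more ')' than '(' (A raises IndexError exactly otherwise, and so does B).
def Pre_raggruppa (indice : Int) (stringa : String) : Prop :=
  ∃ k ∈ List.range (scanStream stringa.toList (indice + 1)).length,
    ((scanStream stringa.toList (indice + 1)).take (k + 1)).count '(' <
      ((scanStream stringa.toList (indice + 1)).take (k + 1)).count ')'

instance (indice : Int) (stringa : String) : Decidable (Pre_raggruppa indice stringa) := by
  unfold Pre_raggruppa; infer_instance

def pvWitness_raggruppa : Int × String := (0, "(a(b)c)x")

def Spec_raggruppa (indice : Int) (stringa : String) (out : Int × String) : Prop := out = raggruppa_alt indice stringa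
instance (indice : Int) (stringa : String) (out : Int × String) : Decidable (Spec_raggruppa indice stringa out) := by unfold Spec_raggruppa; infer_instance

-- ===== CLAIM (what is proved, stated in full; the proofs are below) =====
def Claim_equal_raggruppa : Prop := ∀ (indice : Int) (stringa : String), Dom_raggruppa indice stringa → Pre_raggruppa indice stringa → Spec_raggruppa indice stringa (raggruppa indice stringa)

-- ===== LEMMAS AND PROOFS =====

-- A's counter loop at depth p+1 is: scan one level (B's salta), then continue at depth p.
lemma loopA_eq_scanB (s : List Char) :
    ∀ fuel i p, loopA s fuel i (p + 1) =
      match scanB s fuel i with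
      | none => none
      | some ⟨(j, f'), _⟩ => loopA s f' j p := by
  intro fuel
  induction fuel using Nat.strong_induction_on with
  | _ fuel IH =>
    intro i p
    match fuel with
    | 0 => simp [loopA, scanB]
    | f + 1 =>
      rw [loopA, scanB]
      cases h : PySem.List.pyGet? s i with
      | none => rfl
      | some c =>
        by_cases hc1 : c = '('
        · subst hc1
          simp only [reduceIte, Char.reduceEq]
          rw [IH f (by omega) (i + 1) (p + 1)]
          cases h1 : scanB s f (i + 1) with
          | none => rfl
          | some v =>
            obtain ⟨⟨j, f'⟩, hv⟩ := v
            simp only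
            rw [IH f' (by omega) j p]
            cases h2 : scanB s f' j with
            | none => rfl
            | some w =>
              obtain ⟨⟨k, f''⟩, hw⟩ := w
              rfl
        · by_cases hc2 : c = ')'
          · subst hc2
            simp only [reduceIte, Char.reduceEq]
          · simp only [hc1, hc2, if_false]
            rw [IH f (by omega) (i + 1) p]
            cases h1 : scanB s f (i + 1) with
            | none => rfl
            | some v =>
              obtain ⟨⟨j, f'⟩, hv⟩ := v
              rfl

lemma loopA_zero (s : List Char) (fuel : Nat) (i : Int) : loopA s fuel i 0 = some i := by
  cases fuel <;> rfl

theorem raggruppa_eq_alt (indice : Int) (stringa : String) :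
    raggruppa indice stringa = raggruppa_alt indice stringa := by
  unfold raggruppa raggruppa_alt
  dsimp only
  have h := loopA_eq_scanB stringa.toList (2 * stringa.toList.length + 2) (indice + 1) 0
  rw [Nat.zero_add] at h
  rw [h]
  cases hs : scanB stringa.toList (2 * stringa.toList.length + 2) (indice + 1) with
  | none => rfl
  | some v =>
    obtain ⟨⟨j, f'⟩, hv⟩ := v
    simp only [loopA_zero]

-- ===== VERDICT (by name: the statement is the Claim_ definition above) =====
theorem raggruppa_spec : Claim_equal_raggruppa := by
  intro indice stringa _ _
  unfold Spec_raggruppa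
  exact raggruppa_eq_alt indice stringa
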